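-- pv_equiv track=rewrite | github.com/yyxhdy/tdeadp | evolution/dom.py | get_pareto_dom_rel
-- ===== SOURCE A (Python) =====
-- def get_pareto_dom_rel(values1, values2):
--     n1, n2 = 0, 0
--     for v1, v2 in zip(values1, values2):
--         if v1 < v2:
--             n1 += 1
--         elif v2 < v1:
--             n2 += 1
--
--         if n1 > 0 and n2 > 0:
--             return 0
--
--     if n2 == 0 and n1 > 0:
--         return 1
--     elif n1 == 0 and n2 > 0:
--         return 2
--     else:
--         return 0
-- ===== SOURCE B (Python) =====
-- def get_pareto_dom_rel(values1, values2):
--     pairs = list(zip(values1, values2))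
--     has1 = any(a < b for a, b in pairs)
--     has2 = any(b < a for a, b in pairs)
--     if has1 and not has2:
--         return 1
--     if has2 and not has1:
--         return 2
--     return 0
-- ===== Notes on version B (the rewrite author's own statement) =====
-- stated objective: idiomatic
-- what changed: Replaces the fused counting loop with early exit by two independent any() predicate scans over the zipped pairs and a flat final decision.
import Mathlib
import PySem

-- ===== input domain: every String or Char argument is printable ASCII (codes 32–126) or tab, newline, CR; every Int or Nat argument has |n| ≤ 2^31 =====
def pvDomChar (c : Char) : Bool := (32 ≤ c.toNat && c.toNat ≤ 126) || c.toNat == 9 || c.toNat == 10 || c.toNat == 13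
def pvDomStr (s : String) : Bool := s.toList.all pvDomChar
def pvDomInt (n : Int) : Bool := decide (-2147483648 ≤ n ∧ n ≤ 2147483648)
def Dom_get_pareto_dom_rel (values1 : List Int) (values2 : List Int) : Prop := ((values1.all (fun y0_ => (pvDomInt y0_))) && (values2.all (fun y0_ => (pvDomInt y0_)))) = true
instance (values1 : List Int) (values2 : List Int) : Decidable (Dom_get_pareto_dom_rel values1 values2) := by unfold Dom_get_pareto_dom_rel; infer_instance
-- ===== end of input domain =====

-- B replaces A's fused counting loop (with early exit) by two independent any-scans
-- over the zipped pairs and a flat final decision; same return value everywhere.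
-- ===== PORT A =====
def garLoop : List (Int × Int) → Int → Int → Int
  | [], n1, n2 =>
    if n2 = 0 ∧ n1 > 0 then 1 else if n1 = 0 ∧ n2 > 0 then 2 else 0
  | (v1, v2) :: rest, n1, n2 =>
    let n1' := if v1 < v2 then n1 + 1 else n1
    let n2' := if v1 < v2 then n2 else if v2 < v1 then n2 + 1 else n2
    if n1' > 0 ∧ n2' > 0 then 0 else garLoop rest n1' n2'

def get_pareto_dom_rel (values1 : List Int) (values2 : List Int) : Int :=
  garLoop (values1.zip values2) 0 0

-- ===== PORT B =====
def get_pareto_dom_rel_alt (values1 : List Int) (values2 : List Int) : Int :=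
  let pairs := values1.zip values2
  let has1 := pairs.any (fun p => p.1 < p.2)
  let has2 := pairs.any (fun p => p.2 < p.1)
  if has1 && !has2 then 1 else if has2 && !has1 then 2 else 0

-- ===== PRECONDITION & SPEC =====
def Spec_get_pareto_dom_rel (values1 : List Int) (values2 : List Int) (out : Int) : Prop := out = get_pareto_dom_rel_alt values1 values2
instance (values1 : List Int) (values2 : List Int) (out : Int) : Decidable (Spec_get_pareto_dom_rel values1 values2 out) := by unfold Spec_get_pareto_dom_rel; infer_instance

-- ===== CLAIM (what is proved, stated in full; the proofs are below) =====
def Claim_equal_get_pareto_dom_rel : Prop := ∀ (values1 : List Int) (values2 : List Int), Dom_get_pareto_dom_rel values1 values2 → Spec_get_pareto_dom_rel values1 values2 (get_pareto_dom_rel values1 values2)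

-- ===== LEMMAS AND PROOFS =====

-- ===== VERDICT (by name: the statement is the Claim_ definition above) =====
lemma garLoop_char (l : List (Int × Int)) : ∀ (n1 n2 : Int), 0 ≤ n1 → 0 ≤ n2 →
    garLoop l n1 n2 =
      (if (n1 > 0 ∨ l.any (fun p => p.1 < p.2) = true) ∧ (n2 > 0 ∨ l.any (fun p => p.2 < p.1) = true)
       then 0
       else if n1 > 0 ∨ l.any (fun p => p.1 < p.2) = true then 1
       else if n2 > 0 ∨ l.any (fun p => p.2 < p.1) = true then 2 else 0) := by
  induction l with
  | nil =>
    intro n1 n2 hn1 hn2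
    simp only [garLoop, List.any_nil]
    split_ifs <;> simp_all <;> omega
  | cons p rest ih =>
    rcases p with ⟨v1, v2⟩
    intro n1 n2 hn1 hn2
    have hrec1 : garLoop rest (n1 + 1) n2 = _ := ih (n1 + 1) n2 (by omega) hn2
    have hrec2 : garLoop rest n1 (n2 + 1) = _ := ih n1 (n2 + 1) hn1 (by omega)
    have hrec0 : garLoop rest n1 n2 = _ := ih n1 n2 hn1 hn2
    cases hA1 : rest.any (fun p => decide (p.1 < p.2)) <;>
      cases hA2 : rest.any (fun p => decide (p.2 < p.1)) <;>
        by_cases hlt : v1 < v2 <;> by_cases hgt : v2 < v1 <;>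
          simp [garLoop, hlt, hgt, hA1, hA2, hrec0, hrec1, hrec2] <;> omega

theorem get_pareto_dom_rel_spec : Claim_equal_get_pareto_dom_rel := by
  intro values1 values2 _
  unfold Spec_get_pareto_dom_rel get_pareto_dom_rel get_pareto_dom_rel_alt
  rw [garLoop_char _ 0 0 le_rfl le_rfl]
  simp only [gt_iff_lt, lt_irrefl, false_or]
  set l := values1.zip values2
  by_cases h1 : l.any (fun p => p.1 < p.2) = true <;>
    by_cases h2 : l.any (fun p => p.2 < p.1) = true <;>
      simp [h1, h2]
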